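-- pv_equiv track=rewrite | github.com/anthonywritescode/aoc2018 | day5/part2.py | reacted_length
-- ===== SOURCE A (Python) =====
-- def reacted_length(s: str) -> int:
--     s = s.strip()
--     ret = [s[0]]
--     for c in s[1:]:
--         if ret and c == ret[-1].swapcase():
--             ret.pop()
--         else:
--             ret.append(c)
--     return len(ret)
-- ===== SOURCE B (Python) =====
-- def reacted_length(s: str) -> int:
--     chars = list(s.strip())
--     changed = True
--     while changed:
--         changed = False
--         out = []
--         i = 0
--         n = len(chars)
--         while i < n:
--             if i + 1 < n and chars[i + 1] == chars[i].swapcase():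
--                 changed = True
--                 i += 2
--             else:
--                 out.append(chars[i])
--                 i += 1
--         chars = out
--     return len(chars)
-- ===== Notes on version B (the rewrite author's own statement) =====
-- stated objective: alternative
-- what changed: Replaces the single stack pass with the naive fixpoint method: repeated full left-to-right scans that delete every disjoint adjacent reacting pair until a pass makes no removal (confluence of the reduction makes the results coincide).
import Mathlib
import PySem

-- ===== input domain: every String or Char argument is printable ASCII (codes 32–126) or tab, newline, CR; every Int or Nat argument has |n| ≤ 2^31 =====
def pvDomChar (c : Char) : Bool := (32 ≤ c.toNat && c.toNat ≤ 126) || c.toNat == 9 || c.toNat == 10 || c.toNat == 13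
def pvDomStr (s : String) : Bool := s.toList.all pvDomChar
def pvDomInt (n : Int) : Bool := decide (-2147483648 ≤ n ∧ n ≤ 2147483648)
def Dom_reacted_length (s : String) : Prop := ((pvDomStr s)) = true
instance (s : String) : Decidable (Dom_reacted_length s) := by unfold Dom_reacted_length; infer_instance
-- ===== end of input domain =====

-- B replaces A's single stack pass by the naive repeated-scan fixpoint reduction (same result by confluence); where A raises IndexError (strip() empty) B returns 0.


-- Python str.swapcase, exact on the ASCII domain Dom_reacted_length admits
def swapc (c : Char) : Char :=
  if 97 ≤ c.toNat ∧ c.toNat ≤ 122 then Char.ofNat (c.toNat - 32)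
  else if 65 ≤ c.toNat ∧ c.toNat ≤ 90 then Char.ofNat (c.toNat + 32)
  else c

-- ===== PORT A =====
-- one loop step: `if ret and c == ret[-1].swapcase(): ret.pop() else: ret.append(c)`
def stepA (ret : List Char) (c : Char) : List Char :=
  match ret.getLast? with
  | some t => if c = swapc t then ret.dropLast else ret ++ [c]
  | none => ret ++ [c]

def reacted_length (s : String) : Int :=
  match (PySem.Str.strip s).toList with
  | [] => 0   -- Python raises IndexError at s[0] here; excluded by Pre_
  | c :: rest => ((rest.foldl stepA [c]).length : Int)

-- ===== PORT B =====
-- one full scan: delete each disjoint adjacent reacting pair, report whether anything was removed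
def passB : List Char → List Char × Bool
  | a :: b :: rest =>
      if b = swapc a then ((passB rest).1, true)
      else
        let p := passB (b :: rest)
        (a :: p.1, p.2)
  | l => (l, false)

-- the `while changed:` loop; each iteration shortens the list, so length+1 passes always reach the fixpoint
def reduceB : Nat → List Char → List Char
  | 0, l => l
  | fuel + 1, l =>
      let p := passB l
      if p.2 then reduceB fuel p.1 else p.1

def reacted_length_alt (s : String) : Int :=
  ((reduceB ((PySem.Str.strip s).toList.length + 1) (PySem.Str.strip s).toList).length : Int)

-- ===== PRECONDITION & SPEC =====
-- Pre_ excludes exactly the inputs whose stripped string is empty: there A evaluates s[0] and raises IndexError.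
def Pre_reacted_length (s : String) : Prop := PySem.Str.strip s ≠ ""
instance (s : String) : Decidable (Pre_reacted_length s) := by unfold Pre_reacted_length; infer_instance
def pvWitness_reacted_length : String := "dabAcCaCBAcCcaDA"

def Spec_reacted_length (s : String) (out : Int) : Prop := out = reacted_length_alt s
instance (s : String) (out : Int) : Decidable (Spec_reacted_length s out) := by unfold Spec_reacted_length; infer_instance

-- ===== CLAIM (what is proved, stated in full; the proofs are below) =====
def Claim_equal_reacted_length : Prop := ∀ (s : String), Dom_reacted_length s → Pre_reacted_length s → Spec_reacted_length s (reacted_length s)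

-- ===== LEMMAS AND PROOFS =====

theorem passB_le : ∀ l : List Char, (passB l).1.length ≤ l.length := by
  intro l
  induction l using passB.induct with
  | case1 a rest ih => simp [passB]; omega
  | case2 a b rest hne ih => simp [passB, hne] at ih ⊢; omega
  | case3 l hl =>
      rcases l with _ | ⟨x, _ | ⟨y, r⟩⟩
      · simp [passB]
      · simp [passB]
      · exact (hl x y r rfl).elim

theorem passB_true_lt : ∀ l : List Char, (passB l).2 = true → (passB l).1.length < l.length := by
  intro l
  induction l using passB.induct with
  | case1 a rest ih =>
      intro _
      have := passB_le rest
      simp [passB]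
      omega
  | case2 a b rest hne ih =>
      intro hch
      simp only [passB, if_neg hne] at hch ⊢
      have := ih hch
      simp only [List.length_cons] at this ⊢
      omega
  | case3 l hl =>
      intro hch
      rcases l with _ | ⟨x, _ | ⟨y, r⟩⟩
      · simp [passB] at hch
      · simp [passB] at hch
      · exact (hl x y r rfl).elim

-- irreducible: no adjacent reacting pair
def Irred (l : List Char) : Prop := List.IsChain (fun a b => b ≠ swapc a) l

theorem toNat_ofNat (n : Nat) (h : n.isValidChar) : (Char.ofNat n).toNat = n := by
  simp [Char.ofNat, h]

theorem swapc_invol (c : Char) : swapc (swapc c) = c := by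
  unfold swapc
  by_cases h1 : 97 ≤ c.toNat ∧ c.toNat ≤ 122
  · have hv : (c.toNat - 32).isValidChar := Or.inl (by omega)
    simp only [if_pos h1, toNat_ofNat _ hv]
    have : ¬ (97 ≤ c.toNat - 32 ∧ c.toNat - 32 ≤ 122) := by omega
    rw [if_neg this, if_pos (by omega)]
    have : c.toNat - 32 + 32 = c.toNat := by omega
    rw [this, Char.ofNat_toNat]
  · by_cases h2 : 65 ≤ c.toNat ∧ c.toNat ≤ 90
    · have hv : (c.toNat + 32).isValidChar := Or.inl (by omega)
      simp only [if_neg h1, if_pos h2, toNat_ofNat _ hv]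
      rw [if_pos (by omega)]
      have : c.toNat + 32 - 32 = c.toNat := by omega
      rw [this, Char.ofNat_toNat]
    · rw [if_neg h1, if_neg h2, if_neg h1, if_neg h2]

theorem stepA_nil (c : Char) : stepA [] c = [c] := by simp [stepA]

theorem stepA_eq_some (ret : List Char) (c t : Char) (hl : ret.getLast? = some t) :
    stepA ret c = if c = swapc t then ret.dropLast else ret ++ [c] := by
  unfold stepA; rw [hl]

theorem stepA_eq_none (ret : List Char) (c : Char) (hl : ret.getLast? = none) :
    stepA ret c = ret ++ [c] := by
  unfold stepA; rw [hl]

theorem stepA_irred (ret : List Char) (c : Char) (h : Irred ret) : Irred (stepA ret c) := by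
  cases hl : ret.getLast? with
  | none =>
      have hr : ret = [] := List.getLast?_eq_none_iff.mp hl
      subst hr
      rw [stepA_eq_none [] c hl]
      exact List.isChain_singleton c
  | some t =>
      rw [stepA_eq_some ret c t hl]
      split_ifs with hc
      · have hne : ret ≠ [] := by
          intro h0; subst h0; simp at hl
        have hdrop : ret.dropLast ++ [ret.getLast hne] = ret := List.dropLast_append_getLast hne
        have : Irred (ret.dropLast ++ [ret.getLast hne]) := by rwa [hdrop]
        exact (List.isChain_append.mp this).1
      · refine List.IsChain.append h (List.isChain_singleton c) ?_
        intro x hx y hy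
        simp only [List.head?_cons, Option.mem_def, Option.some.injEq] at hy
        rw [hl] at hx
        simp only [Option.mem_def, Option.some.injEq] at hx
        subst hx; subst hy
        exact hc

theorem cancel_lemma (acc : List Char) (a : Char) (v : List Char) (h : Irred acc) :
    List.foldl stepA acc (a :: swapc a :: v) = List.foldl stepA acc v := by
  have key : stepA (stepA acc a) (swapc a) = acc := by
    cases hl : acc.getLast? with
    | none =>
        have hr : acc = [] := List.getLast?_eq_none_iff.mp hl
        subst hr
        rw [stepA_eq_none [] a hl]
        simp only [List.nil_append]
        rw [stepA_eq_some [a] (swapc a) a (by simp)]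
        simp
    | some t =>
        rw [stepA_eq_some acc a t hl]
        split_ifs with hc
        · -- a reacted with the last element t : a = swapc t
          have hne : acc ≠ [] := by intro h0; subst h0; simp at hl
          have hdrop : acc.dropLast ++ [acc.getLast hne] = acc := List.dropLast_append_getLast hne
          have hgl : acc.getLast hne = t := by
            have h2 := List.getLast?_eq_some_getLast (l := acc) hne
            rw [hl] at h2
            exact (Option.some.injEq _ _ ▸ h2.symm)
          cases hl2 : acc.dropLast.getLast? with
          | none =>
              have hd : acc.dropLast = [] := List.getLast?_eq_none_iff.mp hl2
              have hacc : acc = [t] := by rw [← hdrop, hd, hgl]; simp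
              rw [stepA_eq_none acc.dropLast (swapc a) hl2, hd]
              simp only [List.nil_append]
              rw [hacc, hc, swapc_invol]
          | some u =>
              -- last two of acc are u, t with t ≠ swapc u (Irred acc)
              have hchain : Irred (acc.dropLast ++ [acc.getLast hne]) := by rwa [hdrop]
              have hrel := (List.isChain_append.mp hchain).2.2
              have hnt : acc.getLast hne ≠ swapc u := by
                refine hrel u ?_ _ rfl
                simpa using hl2
              rw [hgl] at hnt
              rw [stepA_eq_some _ _ u hl2]
              rw [if_neg (by rw [hc, swapc_invol]; exact hnt)]
              rw [hc, swapc_invol, ← hgl, hdrop]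
        · -- a pushed: then swapc a pops it again
          rw [stepA_eq_some (acc ++ [a]) (swapc a) a (by simp)]
          rw [if_pos rfl]
          simp
  calc List.foldl stepA acc (a :: swapc a :: v)
      = List.foldl stepA (stepA (stepA acc a) (swapc a)) v := rfl
    _ = List.foldl stepA acc v := by rw [key]

theorem pass_compat (l : List Char) : ∀ acc : List Char, Irred acc →
    List.foldl stepA acc l = List.foldl stepA acc (passB l).1 := by
  induction l using passB.induct with
  | case1 a rest ih =>
      intro acc h
      rw [cancel_lemma acc a rest h]
      simp [passB]
      exact ih acc h
  | case2 a b rest hne ih =>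
      intro acc h
      simp only [passB, if_neg hne]
      show List.foldl stepA (stepA acc a) (b :: rest) = List.foldl stepA (stepA acc a) (passB (b :: rest)).1
      exact ih (stepA acc a) (stepA_irred acc a h)
  | case3 l hl =>
      intro acc h
      rcases l with _ | ⟨x, _ | ⟨y, r⟩⟩
      · simp [passB]
      · simp [passB]
      · exact (hl x y r rfl).elim

theorem pass_false_id (l : List Char) (h : (passB l).2 = false) : (passB l).1 = l := by
  induction l using passB.induct with
  | case1 a rest ih => simp [passB] at h
  | case2 a b rest hne ih =>
      simp only [passB, if_neg hne] at h ⊢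
      rw [ih h]
  | case3 l hl =>
      rcases l with _ | ⟨x, _ | ⟨y, r⟩⟩
      · simp [passB]
      · simp [passB]
      · exact (hl x y r rfl).elim

theorem pass_false_irred (l : List Char) (h : (passB l).2 = false) : Irred l := by
  induction l using passB.induct with
  | case1 a rest ih => simp [passB] at h
  | case2 a b rest hne ih =>
      simp only [passB, if_neg hne] at h
      exact List.IsChain.cons_cons hne (ih h)
  | case3 l hl =>
      rcases l with _ | ⟨x, _ | ⟨y, r⟩⟩
      · exact List.isChain_nil
      · exact List.isChain_singleton x
      · exact (hl x y r rfl).elim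

theorem reduce_compat : ∀ (fuel : Nat) (l : List Char), l.length < fuel →
    ∀ acc : List Char, Irred acc →
    List.foldl stepA acc l = List.foldl stepA acc (reduceB fuel l) := by
  intro fuel
  induction fuel with
  | zero => intro l hlt; omega
  | succ n ih =>
      intro l hlt acc h
      show List.foldl stepA acc l =
        List.foldl stepA acc (if (passB l).2 then reduceB n (passB l).1 else (passB l).1)
      by_cases hch : (passB l).2 = true
      · rw [if_pos hch]
        rw [pass_compat l acc h]
        have hsh := passB_true_lt l hch
        exact ih (passB l).1 (by omega) acc h
      · rw [if_neg hch]
        exact pass_compat l acc h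

theorem reduce_irred : ∀ (fuel : Nat) (l : List Char), l.length < fuel → Irred (reduceB fuel l) := by
  intro fuel
  induction fuel with
  | zero => intro l hlt; omega
  | succ n ih =>
      intro l hlt
      show Irred (if (passB l).2 then reduceB n (passB l).1 else (passB l).1)
      by_cases hch : (passB l).2 = true
      · rw [if_pos hch]
        have hsh := passB_true_lt l hch
        exact ih (passB l).1 (by omega)
      · rw [if_neg hch]
        have hf : (passB l).2 = false := by revert hch; cases (passB l).2 <;> simp
        rw [pass_false_id l hf]
        exact pass_false_irred l hf

theorem irred_run (l : List Char) : ∀ acc : List Char, Irred (acc ++ l) →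
    List.foldl stepA acc l = acc ++ l := by
  induction l with
  | nil => intro acc _; simp
  | cons c rest ih =>
      intro acc h
      have hstep : stepA acc c = acc ++ [c] := by
        cases hl : acc.getLast? with
        | none => exact stepA_eq_none acc c hl
        | some t =>
            rw [stepA_eq_some acc c t hl]
            have hrel := (List.isChain_append.mp h).2.2
            have hnc : c ≠ swapc t := by
              refine hrel t ?_ c ?_
              · simpa using hl
              · simp
            rw [if_neg hnc]
      show List.foldl stepA (stepA acc c) rest = acc ++ c :: rest
      rw [hstep]
      have h' : Irred ((acc ++ [c]) ++ rest) := by simpa [List.append_assoc] using h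
      rw [ih (acc ++ [c]) h']
      simp

-- ===== VERDICT (by name: the statement is the Claim_ definition above) =====
theorem reacted_length_spec : Claim_equal_reacted_length := by
  intro s _ hpre
  unfold Spec_reacted_length reacted_length_alt
  have hne : (PySem.Str.strip s).toList ≠ [] := by
    intro h0
    exact hpre (String.toList_eq_nil_iff.mp h0)
  unfold reacted_length
  cases hl : (PySem.Str.strip s).toList with
  | nil => exact absurd hl hne
  | cons c rest =>
      simp only []
      have h1 : List.foldl stepA [c] rest = List.foldl stepA [] (c :: rest) := by
        simp [List.foldl, stepA_nil]
      have h2 : List.foldl stepA [] (c :: rest) =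
          reduceB ((c :: rest).length + 1) (c :: rest) := by
        rw [reduce_compat ((c :: rest).length + 1) (c :: rest) (by omega) [] List.isChain_nil]
        have h3 := irred_run (reduceB ((c :: rest).length + 1) (c :: rest)) []
          (by simpa using reduce_irred ((c :: rest).length + 1) (c :: rest) (by omega))
        simpa using h3
      rw [h1, h2]
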